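-- pv_equiv track=rewrite | github.com/ljhyung/TIL | kakao_algo/2022_blind/PGS_파괴되지 않은 건물.py | solution
-- ===== SOURCE A (Python) =====
-- def solution(board, skill):
--     # for action in skill:
--     #     for r in range(action[1], action[3]+1):
--     #         for c in range(action[2], action[4]+1):
--     #             if action[0]==1:
--     #                 board[r][c] -= action[5]
--     #             else:
--     #                 board[r][c] += action[5]
--     #
--     # answer = 0
--     # for i in board:
--     #     for j in i:
--     #         if j>0:
--     #             answer += 1
--     answer = 0
--     for r in range(len(board)):
--         for c in range(len(board[0])):
--             for ac in skill:
--                 if ac[1]<=r<=ac[3] and ac[2]<=c<=ac[4]: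
--                     if ac[0]==1:
--                         board[r][c] -= ac[5]
--                     else:
--                         board[r][c] += ac[5]
--             if board[r][c]>0:
--                 answer += 1
--     return answer
-- ===== SOURCE B (Python) =====
-- def solution(board, skill):
--     # Per-row 1D difference array: for each row, record each active skill's
--     # column interval as two point updates, then one prefix-sum sweep counts
--     # the positive cells.  Return value only (A mutates board, B does not).
--     answer = 0
--     m = len(board[0]) if board else 0
--     for r in range(len(board)):
--         diff = [0] * (m + 1)
--         for ac in skill:
--             if ac[1] <= r <= ac[3]:
--                 c1 = max(ac[2], 0)
--                 c2 = min(ac[4], m - 1)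
--                 if c1 <= c2:
--                     v = -ac[5] if ac[0] == 1 else ac[5]
--                     diff[c1] += v
--                     diff[c2 + 1] -= v
--         run = 0
--         for c in range(m):
--             run += diff[c]
--             if board[r][c] + run > 0:
--                 answer += 1
--     return answer
-- ===== Notes on version B (the rewrite author's own statement) =====
-- stated objective: faster
-- what changed: replaces the per-cell scan over all skills with a per-row 1D difference array (two point updates per active skill) plus one prefix-sum sweep, so the inner skill loop over every cell disappears
-- outside the precondition, e.g. on solution([[1]], [[0, 0, 5, 0]]): A returns 1, B raises IndexError; on solution([[]], [[0, 0]]): A returns 0, B raises IndexError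
import Mathlib
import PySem

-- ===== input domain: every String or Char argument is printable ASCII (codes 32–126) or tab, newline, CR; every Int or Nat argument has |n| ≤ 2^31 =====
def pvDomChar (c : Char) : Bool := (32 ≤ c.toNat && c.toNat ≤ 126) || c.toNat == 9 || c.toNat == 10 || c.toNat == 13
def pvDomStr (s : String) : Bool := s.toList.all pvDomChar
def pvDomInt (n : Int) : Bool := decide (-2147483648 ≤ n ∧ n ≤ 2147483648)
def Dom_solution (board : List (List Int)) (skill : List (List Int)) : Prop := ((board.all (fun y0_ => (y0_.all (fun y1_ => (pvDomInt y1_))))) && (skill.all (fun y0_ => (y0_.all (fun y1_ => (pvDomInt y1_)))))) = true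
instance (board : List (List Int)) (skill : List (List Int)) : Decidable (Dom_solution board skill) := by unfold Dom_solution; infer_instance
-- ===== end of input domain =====

-- B replaces A's per-cell scan over all skills by a per-row 1D difference array with one
-- prefix-sum sweep (asymptotically fewer operations).  A mutates `board` in place; only the
-- RETURN value is claimed here (B does not mutate).

-- ===== PORT A =====
-- Inner `for ac in skill` loop body of A: it only ever rewrites the current cell, so the
-- port threads the current cell's value (list indexing via getD is exact under Pre_solution,
-- which guarantees every index taken is in range).
def pvContribStep (r c : Int) (v : Int) (ac : List Int) : Int :=
  if ac.getD 1 0 ≤ r ∧ r ≤ ac.getD 3 0 ∧ ac.getD 2 0 ≤ c ∧ c ≤ ac.getD 4 0 then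
    if ac.getD 0 0 = 1 then v - ac.getD 5 0 else v + ac.getD 5 0
  else v

def solution (board : List (List Int)) (skill : List (List Int)) : Int :=
  (List.range board.length).foldl (fun (answer : Int) (r : Nat) =>
    (List.range (board.headD []).length).foldl (fun (answer : Int) (c : Nat) =>
      let v := skill.foldl (pvContribStep (r : Int) (c : Int)) ((board.getD r []).getD c 0)
      if v > 0 then answer + 1 else answer) answer) 0

-- ===== PORT B =====
-- `diff[c1] += v; diff[c2+1] -= v` of Source B; the clamping guard `c1 ≤ c2` (with c1 ≥ 0,
-- c2 ≤ m-1) keeps both indices in range, so List.modify is exact.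
def pvDiffStep (r : Int) (m : Nat) (diff : List Int) (ac : List Int) : List Int :=
  if ac.getD 1 0 ≤ r ∧ r ≤ ac.getD 3 0 then
    let c1 := max (ac.getD 2 0) 0
    let c2 := min (ac.getD 4 0) ((m : Int) - 1)
    if c1 ≤ c2 then
      let v := if ac.getD 0 0 = 1 then -(ac.getD 5 0) else ac.getD 5 0
      (diff.modify c1.toNat (· + v)).modify (c2 + 1).toNat (· - v)
    else diff
  else diff

def solution_alt (board : List (List Int)) (skill : List (List Int)) : Int :=
  let m := (board.headD []).length
  (List.range board.length).foldl (fun (answer : Int) (r : Nat) =>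
    let diff := skill.foldl (pvDiffStep (r : Int) m) (List.replicate (m + 1) 0)
    ((List.range m).foldl (fun (s : Int × Int) c =>
      let run := s.1 + diff.getD c 0
      (run, if (board.getD r []).getD c 0 + run > 0 then s.2 + 1 else s.2)) (0, answer)).2) 0

-- ===== PRECONDITION & SPEC =====
-- Pre_ admits exactly the inputs on which both Pythons return: boards whose first row is
-- shortest (otherwise A's board[r][c] raises IndexError) and skill rows long enough for every
-- entry that the row/column guards actually reach.  It excludes a few inputs where A still
-- returns only thanks to short-circuit evaluation (a skill row of length 4-5 whose column
-- test never fires, or a zero-width board) while B's clamping reads ac[4]/ac[5] there;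
-- see claim.json cites.
def Pre_solution (board : List (List Int)) (skill : List (List Int)) : Prop :=
  (∀ row ∈ board, (board.headD []).length ≤ row.length) ∧
  (0 < board.length → ∀ ac ∈ skill,
    2 ≤ ac.length ∧
    (ac.getD 1 0 ≤ (board.length : Int) - 1 → 4 ≤ ac.length) ∧
    (max (ac.getD 1 0) 0 ≤ min (ac.getD 3 0) ((board.length : Int) - 1) → 5 ≤ ac.length) ∧
    (max (ac.getD 1 0) 0 ≤ min (ac.getD 3 0) ((board.length : Int) - 1) ∧
       max (ac.getD 2 0) 0 ≤ min (ac.getD 4 0) (((board.headD []).length : Int) - 1) →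
     6 ≤ ac.length))
instance (board : List (List Int)) (skill : List (List Int)) : Decidable (Pre_solution board skill) := by unfold Pre_solution; infer_instance

def pvWitness_solution : List (List Int) × List (List Int) := ([[1], [-2]], [[1, 0, 0, 1, 0, 3]])

def Spec_solution (board : List (List Int)) (skill : List (List Int)) (out : Int) : Prop := out = solution_alt board skill
instance (board : List (List Int)) (skill : List (List Int)) (out : Int) : Decidable (Spec_solution board skill out) := by unfold Spec_solution; infer_instance

-- ===== CLAIM (what is proved, stated in full; the proofs are below) =====
def Claim_equal_solution : Prop := ∀ (board : List (List Int)) (skill : List (List Int)), Dom_solution board skill → Pre_solution board skill → Spec_solution board skill (solution board skill)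

-- ===== LEMMAS AND PROOFS =====

-- one skill's contribution to cell (r, c)
def pvContrib (r c : Int) (ac : List Int) : Int :=
  if ac.getD 1 0 ≤ r ∧ r ≤ ac.getD 3 0 ∧ ac.getD 2 0 ≤ c ∧ c ≤ ac.getD 4 0 then
    (if ac.getD 0 0 = 1 then -(ac.getD 5 0) else ac.getD 5 0)
  else 0

-- prefix sum of the first k entries of diff
def pvP (diff : List Int) (k : Nat) : Int := ∑ j ∈ Finset.range k, diff.getD j 0

theorem pv_cellVal_eq (r c : Int) (skill : List (List Int)) : ∀ v0 : Int,
    skill.foldl (pvContribStep r c) v0 = v0 + (skill.map (pvContrib r c)).sum := by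
  induction skill with
  | nil => simp
  | cons ac tl ih =>
    intro v0
    simp only [List.foldl_cons, List.map_cons, List.sum_cons, ih]
    unfold pvContribStep pvContrib
    split_ifs <;> ring

theorem pv_getD_modify_add (l : List Int) (n j : Nat) (v : Int) :
    (l.modify n (· + v)).getD j 0 = l.getD j 0 + if n = j ∧ n < l.length then v else 0 := by
  simp only [List.getD_eq_getElem?_getD]
  by_cases hn : n < l.length
  · by_cases hnj : n = j
    · subst hnj
      simp [hn]
    · simp [hnj]
  · have h : l.modify n (· + v) = l := List.modify_eq_self (by omega)
    simp [h, hn]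

theorem pv_P_modify_add (l : List Int) (n k : Nat) (v : Int) :
    pvP (l.modify n (· + v)) k = pvP l k + if n < k ∧ n < l.length then v else 0 := by
  unfold pvP
  simp only [pv_getD_modify_add]
  rw [Finset.sum_add_distrib]
  congr 1
  by_cases hn : n < l.length
  · simp only [hn, and_true]
    rw [Finset.sum_ite_eq (Finset.range k) n (fun _ => v)]
    simp [Finset.mem_range]
  · simp [hn]

theorem pv_length_diffStep (r : Int) (m : Nat) (diff : List Int) (ac : List Int) :
    (pvDiffStep r m diff ac).length = diff.length := by
  unfold pvDiffStep; dsimp only; split_ifs <;> simp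

theorem pv_P_diffStep (r : Int) (m c : Nat) (diff : List Int) (ac : List Int)
    (hlen : diff.length = m + 1) (hc : c < m) :
    pvP (pvDiffStep r m diff ac) (c + 1) = pvP diff (c + 1) + pvContrib r c ac := by
  unfold pvDiffStep pvContrib
  dsimp only
  have hsub : ∀ w : Int, (fun x : Int => x - w) = (fun x : Int => x + (-w)) := by
    intro w; funext x; ring
  by_cases hr : ac.getD 1 0 ≤ r ∧ r ≤ ac.getD 3 0
  · rw [if_pos hr]
    by_cases hcc : max (ac.getD 2 0) 0 ≤ min (ac.getD 4 0) ((m : Int) - 1)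
    · rw [if_pos hcc, hsub, pv_P_modify_add, pv_P_modify_add, List.length_modify, hlen]
      split_ifs <;> first | ring1 | omega
    · rw [if_neg hcc, if_neg (by omega :
        ¬ (ac.getD 1 0 ≤ r ∧ r ≤ ac.getD 3 0 ∧ ac.getD 2 0 ≤ (c : Int) ∧ (c : Int) ≤ ac.getD 4 0))]
      ring
  · rw [if_neg hr, if_neg (fun h => hr ⟨h.1, h.2.1⟩)]
    ring

theorem pv_P_fold (r : Int) (m c : Nat) (skill : List (List Int)) (hc : c < m) :
    ∀ diff : List Int, diff.length = m + 1 →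
    pvP (skill.foldl (pvDiffStep r m) diff) (c + 1)
      = pvP diff (c + 1) + (skill.map (pvContrib r c)).sum := by
  induction skill with
  | nil => intro diff _; simp
  | cons ac tl ih =>
    intro diff hlen
    simp only [List.foldl_cons, List.map_cons, List.sum_cons]
    rw [ih _ (by rw [pv_length_diffStep, hlen]), pv_P_diffStep r m c diff ac hlen hc]
    ring

theorem pv_P_replicate (m k : Nat) : pvP (List.replicate m (0 : Int)) k = 0 := by
  unfold pvP
  apply Finset.sum_eq_zero
  intro j _
  simp only [List.getD_eq_getElem?_getD, List.getElem?_replicate]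
  split <;> rfl

theorem pv_row_eq (skill : List (List Int)) (row : List Int) (m : Nat) (r : Int) :
    ∀ k : Nat, k ≤ m → ∀ ans : Int,
    (List.range k).foldl (fun (s : Int × Int) c =>
      let run := s.1 + (skill.foldl (pvDiffStep r m) (List.replicate (m + 1) 0)).getD c 0
      (run, if row.getD c 0 + run > 0 then s.2 + 1 else s.2)) (0, ans)
    = (pvP (skill.foldl (pvDiffStep r m) (List.replicate (m + 1) 0)) k,
       (List.range k).foldl (fun (answer : Int) (c : Nat) =>
         let v := skill.foldl (pvContribStep r (c : Int)) (row.getD c 0)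
         if v > 0 then answer + 1 else answer) ans) := by
  intro k
  induction k with
  | zero => intro _ ans; simp [pvP]
  | succ k ih =>
    intro hk ans
    rw [List.range_succ, List.foldl_append, List.foldl_append, ih (by omega)]
    simp only [List.foldl_cons, List.foldl_nil]
    have h1 : pvP (skill.foldl (pvDiffStep r m) (List.replicate (m + 1) 0)) (k + 1)
        = pvP (skill.foldl (pvDiffStep r m) (List.replicate (m + 1) 0)) k
          + (skill.foldl (pvDiffStep r m) (List.replicate (m + 1) 0)).getD k 0 := by
      unfold pvP; rw [Finset.sum_range_succ]
    have h2 : row.getD k 0 + pvP (skill.foldl (pvDiffStep r m) (List.replicate (m + 1) 0)) (k + 1)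
        = skill.foldl (pvContribStep r (k : Int)) (row.getD k 0) := by
      rw [pv_cellVal_eq, pv_P_fold r m k skill (by omega) _ (by simp), pv_P_replicate]
      ring
    rw [← h1, h2]

-- ===== VERDICT (by name: the statement is the Claim_ definition above) =====
theorem solution_spec : Claim_equal_solution := by
  intro board skill _ _
  show solution board skill = solution_alt board skill
  unfold solution solution_alt
  refine PySem.List.foldl_congr_mem _ _ _ _ ?_
  intro ans r _
  exact (congrArg Prod.snd (pv_row_eq skill (board.getD r []) (board.headD []).length (r : Int)
    (board.headD []).length le_rfl ans)).symm
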